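-- pv_equiv track=rewrite | github.com/antonmakridin/words | core/views.py | raz
-- ===== SOURCE A (Python) =====
-- def raz(num):
--     numbers = {
--     '1': 'раз',
--     '2': 'раза',
--     '3': 'раза',
--     '4': 'раза',
--     '5': 'раз',
--     '6': 'раз',
--     '7': 'раз',
--     '8': 'раз',
--     '9': 'раз',
--     '0': 'раз'
--     }
--     for key, value in numbers.items():
--         if key == num:
--             return(value)
-- ===== SOURCE B (Python) =====
-- def raz(num):
--     if num in ('2', '3', '4'):
--         return 'раза'
--     if num in ('0', '1', '5', '6', '7', '8', '9'):
--         return 'раз'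
--     return None
-- ===== Notes on version B (the rewrite author's own statement) =====
-- stated objective: simpler
-- what changed: Replaces the 10-entry dict built on every call and scanned pairwise with two direct membership tests over literal digit tuples, with an explicit None fallthrough.
import Mathlib
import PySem

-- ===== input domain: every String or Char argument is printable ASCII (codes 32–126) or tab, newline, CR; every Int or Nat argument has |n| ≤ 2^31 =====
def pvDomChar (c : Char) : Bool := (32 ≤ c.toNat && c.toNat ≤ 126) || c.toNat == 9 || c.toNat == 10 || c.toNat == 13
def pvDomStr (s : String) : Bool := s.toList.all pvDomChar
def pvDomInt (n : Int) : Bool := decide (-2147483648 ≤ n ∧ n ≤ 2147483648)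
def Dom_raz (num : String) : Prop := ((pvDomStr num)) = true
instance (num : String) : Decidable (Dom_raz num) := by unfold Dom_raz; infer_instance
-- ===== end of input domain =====

-- B replaces A's per-call dict build and pairwise scan with two direct membership tests (simpler).


-- ===== PORT A =====
-- literal port: dict as association list in insertion order, scanned pairwise
def razTable : List (String × String) :=
  [("1", "раз"), ("2", "раза"), ("3", "раза"), ("4", "раза"), ("5", "раз"),
   ("6", "раз"), ("7", "раз"), ("8", "раз"), ("9", "раз"), ("0", "раз")]

def razLoop (items : List (String × String)) (num : String) : Option String :=
  match items with
  | [] => none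
  | (key, value) :: rest => if key == num then some value else razLoop rest num

def raz (num : String) : Option String := razLoop razTable num

-- ===== PORT B =====
-- B: two membership tests over literal digit tuples, explicit none fallthrough
def raz_alt (num : String) : Option String :=
  if num ∈ ["2", "3", "4"] then some "раза"
  else if num ∈ ["0", "1", "5", "6", "7", "8", "9"] then some "раз"
  else none

-- ===== PRECONDITION & SPEC =====
def Spec_raz (num : String) (out : Option String) : Prop := out = raz_alt num
instance (num : String) (out : Option String) : Decidable (Spec_raz num out) := by unfold Spec_raz; infer_instance

-- ===== CLAIM (what is proved, stated in full; the proofs are below) =====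
def Claim_equal_raz : Prop := ∀ (num : String), Dom_raz num → Spec_raz num (raz num)

-- ===== LEMMAS AND PROOFS =====

-- ===== VERDICT (by name: the statement is the Claim_ definition above) =====
theorem raz_spec : Claim_equal_raz := by
  intro num _
  unfold Spec_raz
  by_cases h0 : num = "0"
  · subst h0; decide
  by_cases h1 : num = "1"
  · subst h1; decide
  by_cases h2 : num = "2"
  · subst h2; decide
  by_cases h3 : num = "3"
  · subst h3; decide
  by_cases h4 : num = "4"
  · subst h4; decide
  by_cases h5 : num = "5"
  · subst h5; decide
  by_cases h6 : num = "6"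
  · subst h6; decide
  by_cases h7 : num = "7"
  · subst h7; decide
  by_cases h8 : num = "8"
  · subst h8; decide
  by_cases h9 : num = "9"
  · subst h9; decide
  have g0 : ¬ "0" = num := fun h => h0 h.symm
  have g1 : ¬ "1" = num := fun h => h1 h.symm
  have g2 : ¬ "2" = num := fun h => h2 h.symm
  have g3 : ¬ "3" = num := fun h => h3 h.symm
  have g4 : ¬ "4" = num := fun h => h4 h.symm
  have g5 : ¬ "5" = num := fun h => h5 h.symm
  have g6 : ¬ "6" = num := fun h => h6 h.symm
  have g7 : ¬ "7" = num := fun h => h7 h.symm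
  have g8 : ¬ "8" = num := fun h => h8 h.symm
  have g9 : ¬ "9" = num := fun h => h9 h.symm
  simp [raz, raz_alt, razLoop, razTable, h0, h1, h2, h3, h4, h5, h6, h7, h8, h9, g0, g1, g2, g3, g4, g5, g6, g7, g8, g9]
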